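-- pv_equiv track=rewrite | github.com/Sriharsan/hackxios_2k25_quantai | src/models/portfolio_optimizer.py | _find_substitute
-- ===== SOURCE A (Python) =====
-- from typing import Dict, List, Optional, Tuple
--
-- def _find_substitute(symbol: str, available_assets: List[str]) -> Optional[str]:
--     """Find substitute for unavailable asset"""
--     substitutes = {
--         'VYM': 'SPY',      # High dividend -> Large cap
--         'VXUS': 'VEA',     # Total intl -> Developed markets
--         'BND': 'TLT',      # Total bond -> Long treasury
--         'BNDX': 'TLT',     # Intl bonds -> US treasury
--         'PDBC': 'GLD',     # Commodities -> Gold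
--         'VNQI': 'VNQ',     # Intl REITs -> US REITs
--     }
--
--     if symbol in substitutes and substitutes[symbol] in available_assets:
--         return substitutes[symbol]
--
--     # Generic substitutions by asset class
--     if symbol.startswith('VT') or symbol in ['VXUS', 'EFA']:  # International equity
--         for candidate in ['VEA', 'EFA', 'VXUS']:
--             if candidate in available_assets:
--                 return candidate
--
--     if symbol in ['BND', 'AGG', 'BNDX']:  # Broad bonds
--         for candidate in ['TLT', 'IEF', 'LQD']:
--             if candidate in available_assets:
--                 return candidate
--
--     return None
-- ===== SOURCE B (Python) =====
-- from typing import Dict, List, Optional, Tuple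
--
-- def _find_substitute(symbol: str, available_assets: List[str]) -> Optional[str]:
--     """Find substitute: rank candidates once, then a single argmin pass over available_assets."""
--     substitutes = {
--         'VYM': 'SPY',
--         'VXUS': 'VEA',
--         'BND': 'TLT',
--         'BNDX': 'TLT',
--         'PDBC': 'GLD',
--         'VNQI': 'VNQ',
--     }
--     priority = {}
--
--     def note(c):
--         if c not in priority:
--             priority[c] = len(priority)
--
--     if symbol in substitutes:
--         note(substitutes[symbol])
--     if symbol.startswith('VT') or symbol in ('VXUS', 'EFA'):
--         for c in ('VEA', 'EFA', 'VXUS'):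
--             note(c)
--     if symbol in ('BND', 'AGG', 'BNDX'):
--         for c in ('TLT', 'IEF', 'LQD'):
--             note(c)
--
--     best = None
--     best_rank = None
--     for a in available_assets:
--         r = priority.get(a)
--         if r is not None and (best_rank is None or r < best_rank):
--             best, best_rank = a, r
--     return best
-- ===== Notes on version B (the rewrite author's own statement) =====
-- stated objective: alternative
-- what changed: B inverts the traversal: it builds a candidate->priority-rank dict once and then makes a single argmin pass over available_assets keeping the lowest-ranked available asset, instead of A's candidate-by-candidate membership probes of available_assets with early returns.
import Mathlib
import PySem

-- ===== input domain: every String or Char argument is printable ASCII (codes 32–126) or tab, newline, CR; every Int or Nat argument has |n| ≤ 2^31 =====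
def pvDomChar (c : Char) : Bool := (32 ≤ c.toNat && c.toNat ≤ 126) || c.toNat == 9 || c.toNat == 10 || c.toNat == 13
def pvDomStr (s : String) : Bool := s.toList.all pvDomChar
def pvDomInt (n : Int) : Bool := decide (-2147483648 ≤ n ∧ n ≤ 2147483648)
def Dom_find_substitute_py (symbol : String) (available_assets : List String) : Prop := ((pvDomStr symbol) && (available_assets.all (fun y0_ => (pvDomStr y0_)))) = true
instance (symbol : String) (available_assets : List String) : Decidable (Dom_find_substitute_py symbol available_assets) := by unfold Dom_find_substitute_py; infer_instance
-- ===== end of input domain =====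

-- B inverts the traversal: it ranks the candidate symbols once in a priority dict and then
-- makes a single argmin pass over available_assets, instead of A's candidate-by-candidate
-- membership probes with early returns (alternative decomposition, same cost).

-- ===== PORT A =====
-- the substitutes dict literal
def pvSubstitutes : PySem.Dict String String :=
  PySem.Dict.ofList [("VYM", "SPY"), ("VXUS", "VEA"), ("BND", "TLT"), ("BNDX", "TLT"), ("PDBC", "GLD"), ("VNQI", "VNQ")]

-- A's 'for candidate in …: if candidate in available_assets: return candidate' loop
def pvScanA (cands : List String) (available_assets : List String) : Option String :=
  match cands with
  | [] => none
  | c :: cs => if available_assets.contains c then some c else pvScanA cs available_assets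

def find_substitute_py (symbol : String) (available_assets : List String) : Option String :=
  -- third block ('Broad bonds') and final 'return None'
  let step3 : Option String :=
    if (["BND", "AGG", "BNDX"] : List String).contains symbol then
      match pvScanA ["TLT", "IEF", "LQD"] available_assets with
      | some c => some c
      | none => none
    else none
  -- second block ('International equity'); falls through to step3
  let step2 : Option String :=
    if PySem.Str.startswith symbol "VT" || (["VXUS", "EFA"] : List String).contains symbol then
      match pvScanA ["VEA", "EFA", "VXUS"] available_assets with
      | some c => some c
      | none => step3
    else step3
  -- first check: direct substitute present and available
  match PySem.Dict.get? pvSubstitutes symbol with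
  | some v => if available_assets.contains v then some v else step2
  | none => step2

-- ===== PORT B =====
-- B's 'note(c)': record c's priority rank if not yet ranked
def pvNote (d : PySem.Dict String Int) (c : String) : PySem.Dict String Int :=
  if PySem.Dict.contains d c then d else PySem.Dict.insert d c (d.size : Int)

-- B's priority dict, built once from symbol
def pvPriority (symbol : String) : PySem.Dict String Int :=
  let d0 : PySem.Dict String Int := PySem.Dict.empty
  let d1 := match PySem.Dict.get? pvSubstitutes symbol with
            | some v => pvNote d0 v
            | none => d0
  let d2 := if PySem.Str.startswith symbol "VT" || (["VXUS", "EFA"] : List String).contains symbol then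
              (["VEA", "EFA", "VXUS"] : List String).foldl pvNote d1
            else d1
  if (["BND", "AGG", "BNDX"] : List String).contains symbol then
    (["TLT", "IEF", "LQD"] : List String).foldl pvNote d2
  else d2

-- B's loop body: keep the available asset with the smallest rank (first wins on no-improvement)
def pvBestStep (prio : PySem.Dict String Int) (acc : Option (String × Int)) (a : String) : Option (String × Int) :=
  match PySem.Dict.get? prio a with
  | none => acc
  | some r =>
    match acc with
    | none => some (a, r)
    | some (b, rb) => if r < rb then some (a, r) else some (b, rb)

def find_substitute_py_alt (symbol : String) (available_assets : List String) : Option String :=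
  (available_assets.foldl (pvBestStep (pvPriority symbol)) none).map Prod.fst

-- ===== PRECONDITION & SPEC =====
def Spec_find_substitute_py (symbol : String) (available_assets : List String) (out : Option String) : Prop := out = find_substitute_py_alt symbol available_assets
instance (symbol : String) (available_assets : List String) (out : Option String) : Decidable (Spec_find_substitute_py symbol available_assets out) := by unfold Spec_find_substitute_py; infer_instance

-- ===== CLAIM (what is proved, stated in full; the proofs are below) =====
def Claim_equal_find_substitute_py : Prop := ∀ (symbol : String) (available_assets : List String), Dom_find_substitute_py symbol available_assets → Spec_find_substitute_py symbol available_assets (find_substitute_py symbol available_assets)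

-- ===== LEMMAS AND PROOFS =====
-- empty priority dict: the scan keeps its accumulator
theorem pvScan_empty (avail : List String) (acc : Option (String × Int)) :
    avail.foldl (pvBestStep PySem.Dict.empty) acc = acc := by
  induction avail generalizing acc with
  | nil => rfl
  | cons a t ih => simpa [pvBestStep, PySem.Dict.empty, PySem.Dict.get?] using ih acc

-- singleton priority dict: the scan finds x iff x is available
theorem pvScan_one (x : String) (avail : List String) :
    (avail.foldl (pvBestStep (PySem.Dict.mk [(x, (0 : Int))])) none
        = if x ∈ avail then some (x, 0) else none)
    ∧ (avail.foldl (pvBestStep (PySem.Dict.mk [(x, (0 : Int))])) (some (x, 0)) = some (x, 0)) := by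
  induction avail with
  | nil => simp
  | cons a t ih =>
      by_cases hx : a = x
      · simp [pvBestStep, PySem.Dict.get?, hx, ih.2]
      · simp [pvBestStep, PySem.Dict.get?, Ne.symm hx, ih.1, ih.2]
  
-- three-candidate priority dict: the scan returns the lowest-ranked available candidate
theorem pvScan_three (x y z : String) (hxy : x ≠ y) (hxz : x ≠ z) (hyz : y ≠ z) (avail : List String) :
    (avail.foldl (pvBestStep (PySem.Dict.mk [(x, (0 : Int)), (y, 1), (z, 2)])) none
        = if x ∈ avail then some (x, 0) else if y ∈ avail then some (y, 1) else if z ∈ avail then some (z, 2) else none)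
    ∧ (avail.foldl (pvBestStep (PySem.Dict.mk [(x, (0 : Int)), (y, 1), (z, 2)])) (some (z, 2))
        = if x ∈ avail then some (x, 0) else if y ∈ avail then some (y, 1) else some (z, 2))
    ∧ (avail.foldl (pvBestStep (PySem.Dict.mk [(x, (0 : Int)), (y, 1), (z, 2)])) (some (y, 1))
        = if x ∈ avail then some (x, 0) else some (y, 1))
    ∧ (avail.foldl (pvBestStep (PySem.Dict.mk [(x, (0 : Int)), (y, 1), (z, 2)])) (some (x, 0)) = some (x, 0)) := by
  induction avail with
  | nil => simp
  | cons a t ih =>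
      by_cases h1 : a = x
      · simp [pvBestStep, PySem.Dict.get?, h1, ih.2.2.2]
      · by_cases h2 : a = y
        · subst h2
          simp [pvBestStep, PySem.Dict.get?, hxy, ih.2.2.1, ih.2.2.2]
        · by_cases h3 : a = z
          · subst h3
            simp [pvBestStep, PySem.Dict.get?, hxz, hyz, ih.2.1, ih.2.2.1, ih.2.2.2]
          · simp [pvBestStep, PySem.Dict.get?, Ne.symm h1, Ne.symm h2, Ne.symm h3, ih.1, ih.2.1, ih.2.2.1, ih.2.2.2]

-- ===== VERDICT (by name: the statement is the Claim_ definition above) =====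
theorem find_substitute_py_spec : Claim_equal_find_substitute_py := by
  intro symbol avail _
  unfold Spec_find_substitute_py find_substitute_py find_substitute_py_alt
  by_cases h1 : symbol = "VYM"
  · subst h1
    rw [show pvPriority "VYM" = PySem.Dict.mk [("SPY", (0 : Int))] from rfl,
        (pvScan_one "SPY" avail).1,
        show PySem.Dict.get? pvSubstitutes "VYM" = some "SPY" by decide]
    by_cases m : "SPY" ∈ avail <;>
      simp [PySem.Chars.startswith, List.isPrefixOf, m]
  ·
    by_cases h2 : symbol = "VXUS"
    · subst h2
      rw [show pvPriority "VXUS" = PySem.Dict.mk [("VEA", (0 : Int)), ("EFA", 1), ("VXUS", 2)] from rfl,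
          (pvScan_three "VEA" "EFA" "VXUS" (by decide) (by decide) (by decide) avail).1,
          show PySem.Dict.get? pvSubstitutes "VXUS" = some "VEA" by decide]
      by_cases m1 : "VEA" ∈ avail <;> by_cases m2 : "EFA" ∈ avail <;> by_cases m3 : "VXUS" ∈ avail <;>
        simp [pvScanA, PySem.Chars.startswith, List.isPrefixOf, m1, m2, m3]
    ·
      by_cases h3 : symbol = "BND"
      · subst h3
        rw [show pvPriority "BND" = PySem.Dict.mk [("TLT", (0 : Int)), ("IEF", 1), ("LQD", 2)] from rfl,
            (pvScan_three "TLT" "IEF" "LQD" (by decide) (by decide) (by decide) avail).1,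
            show PySem.Dict.get? pvSubstitutes "BND" = some "TLT" by decide]
        by_cases m1 : "TLT" ∈ avail <;> by_cases m2 : "IEF" ∈ avail <;> by_cases m3 : "LQD" ∈ avail <;>
          simp [pvScanA, PySem.Chars.startswith, List.isPrefixOf, m1, m2, m3]
      ·
        by_cases h4 : symbol = "BNDX"
        · subst h4
          rw [show pvPriority "BNDX" = PySem.Dict.mk [("TLT", (0 : Int)), ("IEF", 1), ("LQD", 2)] from rfl,
              (pvScan_three "TLT" "IEF" "LQD" (by decide) (by decide) (by decide) avail).1,
              show PySem.Dict.get? pvSubstitutes "BNDX" = some "TLT" by decide]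
          by_cases m1 : "TLT" ∈ avail <;> by_cases m2 : "IEF" ∈ avail <;> by_cases m3 : "LQD" ∈ avail <;>
            simp [pvScanA, PySem.Chars.startswith, List.isPrefixOf, m1, m2, m3]
        ·
          by_cases h5 : symbol = "PDBC"
          · subst h5
            rw [show pvPriority "PDBC" = PySem.Dict.mk [("GLD", (0 : Int))] from rfl,
                (pvScan_one "GLD" avail).1,
                show PySem.Dict.get? pvSubstitutes "PDBC" = some "GLD" by decide]
            by_cases m : "GLD" ∈ avail <;>
              simp [PySem.Chars.startswith, List.isPrefixOf, m]
          ·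
            by_cases h6 : symbol = "VNQI"
            · subst h6
              rw [show pvPriority "VNQI" = PySem.Dict.mk [("VNQ", (0 : Int))] from rfl,
                  (pvScan_one "VNQ" avail).1,
                  show PySem.Dict.get? pvSubstitutes "VNQI" = some "VNQ" by decide]
              by_cases m : "VNQ" ∈ avail <;>
                simp [PySem.Chars.startswith, List.isPrefixOf, m]
            ·
              by_cases h7 : symbol = "EFA"
              · subst h7
                rw [show pvPriority "EFA" = PySem.Dict.mk [("VEA", (0 : Int)), ("EFA", 1), ("VXUS", 2)] from rfl,
                    (pvScan_three "VEA" "EFA" "VXUS" (by decide) (by decide) (by decide) avail).1,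
                    show PySem.Dict.get? pvSubstitutes "EFA" = none by decide]
                by_cases m1 : "VEA" ∈ avail <;> by_cases m2 : "EFA" ∈ avail <;> by_cases m3 : "VXUS" ∈ avail <;>
                  simp [pvScanA, PySem.Chars.startswith, List.isPrefixOf, m1, m2, m3]
              ·
                by_cases h8 : symbol = "AGG"
                · subst h8
                  rw [show pvPriority "AGG" = PySem.Dict.mk [("TLT", (0 : Int)), ("IEF", 1), ("LQD", 2)] from rfl,
                      (pvScan_three "TLT" "IEF" "LQD" (by decide) (by decide) (by decide) avail).1,
                      show PySem.Dict.get? pvSubstitutes "AGG" = none by decide]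
                  by_cases m1 : "TLT" ∈ avail <;> by_cases m2 : "IEF" ∈ avail <;> by_cases m3 : "LQD" ∈ avail <;>
                    simp [pvScanA, PySem.Chars.startswith, List.isPrefixOf, m1, m2, m3]
                ·
                    -- symbol is none of the special strings
                  have hsub : pvSubstitutes = PySem.Dict.mk [("VYM", "SPY"), ("VXUS", "VEA"), ("BND", "TLT"),
                      ("BNDX", "TLT"), ("PDBC", "GLD"), ("VNQI", "VNQ")] := by decide
                  have hget : PySem.Dict.get? pvSubstitutes symbol = none := by
                    rw [hsub]
                    simp [PySem.Dict.get?, Ne.symm h1, Ne.symm h2, Ne.symm h3,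
                          Ne.symm h4, Ne.symm h5, Ne.symm h6]
                  have hc3 : (["BND", "AGG", "BNDX"] : List String).contains symbol = false := by
                    simp [h3, h8, h4]
                  by_cases h9 : PySem.Chars.startswith symbol.toList ['V', 'T'] = true
                  · have hi : (PySem.Str.startswith symbol "VT" || (["VXUS", "EFA"] : List String).contains symbol) = true := by
                      simp [PySem.Str.startswith, h9]
                    have hp : pvPriority symbol = PySem.Dict.mk [("VEA", (0 : Int)), ("EFA", 1), ("VXUS", 2)] := by
                      unfold pvPriority
                      rw [hget, hi, hc3]
                      rfl
                    rw [hp, (pvScan_three "VEA" "EFA" "VXUS" (by decide) (by decide) (by decide) avail).1, hget]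
                    by_cases m1 : "VEA" ∈ avail <;> by_cases m2 : "EFA" ∈ avail <;> by_cases m3 : "VXUS" ∈ avail <;>
                      simp [pvScanA, h9, h3, h4, h8, m1, m2, m3]
                  · have hi : (PySem.Str.startswith symbol "VT" || (["VXUS", "EFA"] : List String).contains symbol) = false := by
                      simp [PySem.Str.startswith, h2, h7]
                      simpa using h9
                    have hp : pvPriority symbol = PySem.Dict.empty := by
                      unfold pvPriority
                      rw [hget, hi, hc3]
                      rfl
                    rw [hp, pvScan_empty avail none, hget]
                    simp [h9, h2, h7, h3, h4, h8]
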